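-- pv_equiv track=rewrite | github.com/heitorchang/learn-code | battles/challenges/caucusRace_dp.py | caucusRace
-- ===== SOURCE A (Python) =====
-- def computeCycle(values):
--     cycle = []
--     runningSum = 0
--     for n in values:
--         runningSum += n
--         cycle.append(runningSum)
--     for n in values:
--         runningSum += n
--         cycle.append(runningSum)
--     return cycle
--
-- def process(A):
--     N = len(A)
--     M = [[50000000 for _ in range(N)] for _ in range(N)]
--     for i in range(N):
--         M[i][i] = A[i]
--     for i in range(N):
--         for j in range(i+1, N):
--             if A[j] < M[i][j-1]:
--                 M[i][j] = A[j]
--             else: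
--                 M[i][j] = M[i][j-1]
--     return M
--
-- def caucusRace(values):
--     winners = []
--     cycle = computeCycle(values)
--     len_cycle = len(cycle)
--     len_values = len(values)
--     M = process(cycle)
--
--     def RMQ(i, j):
--         return M[i][j]
--
--     offset = 0
--     for i in range(len(values)):
--         if RMQ(i, i+len_values-1) + offset > 0:
--             winners.append(i)
--         offset = -cycle[i]
--     return winners
-- ===== SOURCE B (Python) =====
-- def caucusRace(values):
--     # Sliding-window minimum in O(N): suffix minima of the prefix sums plus a
--     # running minimum of the (shifted) second cycle half replace A's O(N^2) RMQ table.
--     N = len(values)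
--     pref = []
--     s = 0
--     for v in values:
--         s += v
--         pref.append(s)
--     total = s
--     suf_rev = []
--     m = None
--     for p in reversed(pref):
--         m = p if m is None or p < m else m
--         suf_rev.append(m)
--     suf = suf_rev[::-1]
--     winners = []
--     best2 = None
--     base = 0
--     for i in range(N):
--         m = suf[i]
--         if best2 is not None and best2 < m:
--             m = best2
--         if m - base > 0:
--             winners.append(i)
--         base = pref[i]
--         v2 = pref[i] + total
--         best2 = v2 if best2 is None or v2 < best2 else best2
--     return winners
-- ===== Notes on version B (the rewrite author's own statement) =====
-- stated objective: faster
-- what changed: Replaces the O(N^2) full range-minimum table over the doubled prefix-sum array with an O(N) pass: suffix minima of the prefix sums plus a running minimum for the wrapped part of each window.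
import Mathlib
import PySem

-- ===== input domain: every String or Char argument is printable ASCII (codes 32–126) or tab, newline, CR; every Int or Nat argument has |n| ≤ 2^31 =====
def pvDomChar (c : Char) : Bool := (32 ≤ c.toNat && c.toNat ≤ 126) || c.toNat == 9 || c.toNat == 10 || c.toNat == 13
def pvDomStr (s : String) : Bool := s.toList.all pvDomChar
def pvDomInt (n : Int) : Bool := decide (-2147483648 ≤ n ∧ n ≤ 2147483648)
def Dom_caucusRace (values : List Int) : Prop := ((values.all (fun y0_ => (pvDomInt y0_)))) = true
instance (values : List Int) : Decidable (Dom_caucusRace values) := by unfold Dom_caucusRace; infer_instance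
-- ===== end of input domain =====

-- B replaces A's O(N^2) range-minimum table with an O(N) suffix-min/running-min pass (measured asymptotically faster).

-- ===== PORT A =====
-- computeCycle: two consecutive loops extending the running sum over values twice
def computeCycleA (values : List Int) : List Int :=
  let step := fun (st : List Int × Int) (n : Int) => (st.1 ++ [st.2 + n], st.2 + n)
  ((values.foldl step (values.foldl step ([], 0)))).1

def getMA (M : List (List Int)) (i j : Nat) : Int := (M.getD i []).getD j 0
def setMA (M : List (List Int)) (i j : Nat) (x : Int) : List (List Int) :=
  M.set i ((M.getD i []).set j x)

-- process: N x N table M with M[i][j] = min of A[i..j]; indices are always in range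
-- in A, so the Nat-indexed get/set above are exact.
def processA (A : List Int) : List (List Int) :=
  let N := A.length
  let M0 := List.replicate N (List.replicate N (50000000 : Int))
  let M1 := (List.range N).foldl (fun M i => setMA M i i (A.getD i 0)) M0
  (List.range N).foldl (fun M i =>
    (List.range (N - (i + 1))).foldl (fun M k =>
      let j := i + 1 + k
      if A.getD j 0 < getMA M i (j - 1) then setMA M i j (A.getD j 0)
      else setMA M i j (getMA M i (j - 1))) M) M1

def caucusRace (values : List Int) : List Int :=
  let cycle := computeCycleA values
  let len_values := values.length
  let M := processA cycle
  let res := (List.range len_values).foldl (fun (st : List Int × Int) i =>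
      let st1 := if getMA M i (i + len_values - 1) + st.2 > 0 then (st.1 ++ [(i : Int)], st.2) else st
      (st1.1, -(cycle.getD i 0))) ([], 0)
  res.1

-- ===== PORT B =====
def caucusRace_alt (values : List Int) : List Int :=
  let N := values.length
  let pt := values.foldl (fun (st : List Int × Int) v => (st.1 ++ [st.2 + v], st.2 + v)) ([], 0)
  let pref := pt.1
  let total := pt.2
  let suf := ((pref.reverse.foldl (fun (st : List Int × Option Int) p =>
      let m := match st.2 with
        | none => p
        | some m0 => if p < m0 then p else m0
      (st.1 ++ [m], some m)) ([], none)).1).reverse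
  let res := (List.range N).foldl (fun (st : List Int × Option Int × Int) i =>
      let m := suf.getD i 0
      let m := match st.2.1 with
        | some b => if b < m then b else m
        | none => m
      let winners := if m - st.2.2 > 0 then st.1 ++ [(i : Int)] else st.1
      let v2 := pref.getD i 0 + total
      let best2 := match st.2.1 with
        | none => v2
        | some b => if v2 < b then v2 else b
      (winners, some best2, pref.getD i 0)) ([], none, 0)
  res.1

-- ===== PRECONDITION & SPEC =====
def Spec_caucusRace (values : List Int) (out : List Int) : Prop := out = caucusRace_alt values
instance (values : List Int) (out : List Int) : Decidable (Spec_caucusRace values out) := by unfold Spec_caucusRace; infer_instance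

-- ===== CLAIM (what is proved, stated in full; the proofs are below) =====
def Claim_equal_caucusRace : Prop := ∀ (values : List Int), Dom_caucusRace values → Spec_caucusRace values (caucusRace values)

-- ===== LEMMAS AND PROOFS =====

-- prefix sums starting from running total s
def PSl : Int → List Int → List Int
  | _, [] => []
  | s, v :: vs => (s + v) :: PSl (s + v) vs

-- minimum of c[i..i+n] (getD view)
def RminL (c : List Int) (i : Nat) : Nat → Int
  | 0 => c.getD i 0
  | n + 1 => min (RminL c i n) (c.getD (i + n + 1) 0)

def rowInitL (L : Nat) (c : List Int) (i : Nat) : List Int :=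
  (List.replicate L (50000000 : Int)).set i (c.getD i 0)

def rowStepL (c : List Int) (i : Nat) (row : List Int) (k : Nat) : List Int :=
  if c.getD (i + 1 + k) 0 < row.getD (i + k) 0 then row.set (i + 1 + k) (c.getD (i + 1 + k) 0)
  else row.set (i + 1 + k) (row.getD (i + k) 0)

def condW (c : List Int) (N i : Nat) : Bool :=
  decide (RminL c i (N - 1) + (if i = 0 then 0 else -(c.getD (i - 1) 0)) > 0)

def WL (c : List Int) (N t : Nat) : List Int :=
  (List.range t).foldl (fun acc i => if condW c N i then acc ++ [(i : Int)] else acc) []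

lemma if_lt_eq_min (a b : Int) : (if b < a then b else a) = min a b := by
  rw [min_comm, min_def]; split <;> split <;> omega

lemma getD_set {α : Type} (l : List α) (i r : Nat) (x d : α) (hi : i < l.length) :
    (l.set i x).getD r d = if r = i then x else l.getD r d := by
  by_cases h : r = i
  · subst h; simp [List.getD_eq_getElem?_getD, List.getElem?_set_self hi]
  · simp [List.getD_eq_getElem?_getD, List.getElem?_set_ne (fun hh => h hh.symm), h]

lemma foldPS (vs : List Int) : ∀ (acc : List Int) (s : Int),
    vs.foldl (fun (st : List Int × Int) v => (st.1 ++ [st.2 + v], st.2 + v)) (acc, s)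
      = (acc ++ PSl s vs, s + vs.sum) := by
  induction vs with
  | nil => intro acc s; simp [PSl]
  | cons v vs ih =>
      intro acc s
      simp only [List.foldl_cons, ih, PSl, List.sum_cons]
      refine Prod.ext ?_ ?_
      · simp
      · dsimp; ring

lemma PSl_length (vs : List Int) : ∀ s, (PSl s vs).length = vs.length := by
  induction vs with
  | nil => intro s; rfl
  | cons v vs ih => intro s; simp [PSl, ih]

lemma PSl_shift (vs : List Int) : ∀ s t, PSl (s + t) vs = (PSl s vs).map (· + t) := by
  induction vs with
  | nil => intro s t; rfl
  | cons v vs ih =>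
      intro s t
      simp only [PSl, List.map_cons]
      have h1 : s + t + v = (s + v) + t := by ring
      rw [h1, ih]

lemma RminL_split (c : List Int) (i n : Nat) : ∀ m, RminL c i (n + 1 + m) = min (RminL c i n) (RminL c (i + n + 1) m) := by
  intro m
  induction m with
  | zero => simp [RminL]
  | succ m ih =>
      have h1 : n + 1 + (m + 1) = (n + 1 + m) + 1 := by omega
      rw [h1]
      show min (RminL c i (n + 1 + m)) (c.getD (i + (n + 1 + m) + 1) 0) = _
      rw [ih]
      have h2 : i + (n + 1 + m) + 1 = (i + n + 1) + m + 1 := by omega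
      rw [h2, min_assoc]
      rfl

lemma RminL_congr (c d : List Int) (i : Nat) :
    ∀ n, (∀ k, i ≤ k → k ≤ i + n → c.getD k 0 = d.getD k 0) → RminL c i n = RminL d i n := by
  intro n
  induction n with
  | zero => intro h; exact h i (le_refl _) (by omega)
  | succ n ih =>
      intro h
      show min (RminL c i n) (c.getD (i + n + 1) 0) = min (RminL d i n) (d.getD (i + n + 1) 0)
      rw [ih (fun k h1 h2 => h k h1 (by omega)), h (i + n + 1) (by omega) (by omega)]

lemma getD_reverse (l : List Int) (j : Nat) (h : j < l.length) :
    l.reverse.getD j 0 = l.getD (l.length - 1 - j) 0 := by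
  rw [List.getD_eq_getElem?_getD, List.getD_eq_getElem?_getD,
      List.getElem?_reverse (by simpa using h)]

lemma RminL_reverse (l : List Int) : ∀ k, k < l.length →
    RminL l.reverse 0 k = RminL l (l.length - 1 - k) k := by
  intro k
  induction k with
  | zero =>
      intro h
      show l.reverse.getD 0 0 = l.getD (l.length - 1 - 0) 0
      exact getD_reverse l 0 h
  | succ k ih =>
      intro h
      show min (RminL l.reverse 0 k) (l.reverse.getD (0 + k + 1) 0) = _
      rw [ih (by omega)]
      have h1 : (0 + k + 1) < l.length := by omega
      rw [getD_reverse l _ h1]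
      have hc : RminL l (l.length - 1 - (k + 1)) (k + 1)
          = min (l.getD (l.length - 1 - (k + 1)) 0) (RminL l (l.length - 1 - k) k) := by
        have := RminL_split l (l.length - 1 - (k + 1)) 0 k
        have e1 : (l.length - 1 - (k + 1)) + 0 + 1 = l.length - 1 - k := by omega
        have e2 : (0 : Nat) + 1 + k = k + 1 := by omega
        rw [e2, e1] at this
        simpa [RminL] using this
      rw [hc]
      have e3 : l.length - 1 - (0 + k + 1) = l.length - 1 - (k + 1) := by omega
      rw [e3, min_comm]

lemma setMA_length (M : List (List Int)) (i j : Nat) (x : Int) :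
    (setMA M i j x).length = M.length := by
  simp [setMA]

lemma setMA_getD (M : List (List Int)) (i j r : Nat) (x : Int) (hi : i < M.length) :
    (setMA M i j x).getD r [] = if r = i then (M.getD i []).set j x else M.getD r [] := by
  simp only [setMA]
  exact getD_set M i r _ [] hi

-- the inner loop of processA acts on row i only
lemma inner_len (c : List Int) (i : Nat) (ks : List Nat) : ∀ (M : List (List Int)),
    (ks.foldl (fun M k =>
      if c.getD (i + 1 + k) 0 < getMA M i (i + 1 + k - 1) then setMA M i (i + 1 + k) (c.getD (i + 1 + k) 0)
      else setMA M i (i + 1 + k) (getMA M i (i + 1 + k - 1))) M).length = M.length := by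
  induction ks with
  | nil => intro M; rfl
  | cons k ks ih =>
      intro M
      simp only [List.foldl_cons]
      rw [ih]
      split <;> rw [setMA_length]

lemma inner_get (c : List Int) (i : Nat) (ks : List Nat) : ∀ (M : List (List Int)), i < M.length → ∀ r,
    (ks.foldl (fun M k =>
      if c.getD (i + 1 + k) 0 < getMA M i (i + 1 + k - 1) then setMA M i (i + 1 + k) (c.getD (i + 1 + k) 0)
      else setMA M i (i + 1 + k) (getMA M i (i + 1 + k - 1))) M).getD r []
    = if r = i then ks.foldl (rowStepL c i) (M.getD i []) else M.getD r [] := by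
  induction ks with
  | nil =>
      intro M hM r
      simp only [List.foldl_nil]
      by_cases h : r = i
      · subst h; rw [if_pos rfl]
      · rw [if_neg h]
  | cons k ks ih =>
      intro M hM r
      simp only [List.foldl_cons]
      have hstep : (if c.getD (i + 1 + k) 0 < getMA M i (i + 1 + k - 1) then setMA M i (i + 1 + k) (c.getD (i + 1 + k) 0)
          else setMA M i (i + 1 + k) (getMA M i (i + 1 + k - 1)))
          = M.set i (rowStepL c i (M.getD i []) k) := by
        have hj : i + 1 + k - 1 = i + k := by omega
        simp only [getMA, rowStepL, setMA, hj]
        split <;> rfl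
      rw [hstep]
      have hlen : i < (M.set i (rowStepL c i (M.getD i []) k)).length := by simpa using hM
      rw [ih _ hlen r]
      have hget : (M.set i (rowStepL c i (M.getD i []) k)).getD i [] = rowStepL c i (M.getD i []) k := by
        rw [getD_set _ _ _ _ _ hM]; simp
      by_cases hr : r = i
      · subst hr; rw [if_pos rfl, if_pos rfl, hget]
      · rw [if_neg hr, if_neg hr, getD_set _ _ _ _ _ hM, if_neg hr]

-- stage 1: the diagonal-filling loop
lemma stage1_len (c : List Int) (L : Nat) (t : Nat) :
    ((List.range t).foldl (fun M i => setMA M i i (c.getD i 0))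
      (List.replicate L (List.replicate L (50000000 : Int)))).length = L := by
  induction t with
  | zero => simp
  | succ t ih =>
      rw [List.range_succ, List.foldl_append]
      simp only [List.foldl_cons, List.foldl_nil, setMA_length]
      exact ih

lemma stage1_get (c : List Int) (L : Nat) : ∀ t, t ≤ L → ∀ r, r < L →
    ((List.range t).foldl (fun M i => setMA M i i (c.getD i 0))
      (List.replicate L (List.replicate L (50000000 : Int)))).getD r []
    = if r < t then rowInitL L c r else List.replicate L (50000000 : Int) := by
  intro t
  induction t with
  | zero =>
      intro _ r hr
      simp [List.getD_eq_getElem?_getD, hr]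
  | succ t ih =>
      intro ht r hr
      rw [List.range_succ, List.foldl_append]
      simp only [List.foldl_cons, List.foldl_nil]
      have hlen : t < ((List.range t).foldl (fun M i => setMA M i i (c.getD i 0))
          (List.replicate L (List.replicate L (50000000 : Int)))).length := by
        rw [stage1_len]; omega
      rw [setMA_getD _ _ _ _ _ hlen]
      by_cases hrt : r = t
      · subst hrt
        rw [if_pos rfl, ih (by omega) r hr, if_neg (by omega), if_pos (by omega)]
        rfl
      · rw [if_neg hrt, ih (by omega) r hr]
        by_cases h2 : r < t
        · rw [if_pos h2, if_pos (by omega)]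
        · rw [if_neg h2, if_neg (by omega)]

lemma rowInitL_length (L : Nat) (c : List Int) (i : Nat) : (rowInitL L c i).length = L := by
  simp [rowInitL]

lemma rowInitL_get_self (L : Nat) (c : List Int) (i : Nat) (hi : i < L) :
    (rowInitL L c i).getD i 0 = c.getD i 0 := by
  rw [rowInitL, getD_set _ _ _ _ _ (by simpa using hi), if_pos rfl]

lemma rowfold_len (c : List Int) (L i : Nat) (t : Nat) :
    ((List.range t).foldl (rowStepL c i) (rowInitL L c i)).length = L := by
  induction t with
  | zero => simp [rowInitL_length]
  | succ t ih =>
      rw [List.range_succ, List.foldl_append]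
      simp only [List.foldl_cons, List.foldl_nil, rowStepL]
      split <;> simp [ih]

lemma rowfold_get (c : List Int) (L i : Nat) (hi : i < L) : ∀ t, i + t < L → ∀ p,
    ((List.range t).foldl (rowStepL c i) (rowInitL L c i)).getD p 0
      = if i ≤ p ∧ p ≤ i + t then RminL c i (p - i) else (rowInitL L c i).getD p 0 := by
  intro t
  induction t with
  | zero =>
      intro _ p
      simp only [List.range_zero, List.foldl_nil]
      by_cases hp : i ≤ p ∧ p ≤ i + 0
      · have hpi : p = i := by omega
        subst hpi
        rw [if_pos hp, rowInitL_get_self L c p hi]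
        have hz : p - p = 0 := by omega
        rw [hz]
        rfl
      · rw [if_neg hp]
  | succ t ih =>
      intro ht p
      rw [List.range_succ, List.foldl_append]
      simp only [List.foldl_cons, List.foldl_nil]
      set row := (List.range t).foldl (rowStepL c i) (rowInitL L c i) with hrow
      have hlen : row.length = L := rowfold_len c L i t
      have hprev : row.getD (i + t) 0 = RminL c i t := by
        rw [ih (by omega) (i + t), if_pos (by omega)]
        simp
      have e21 : i + 1 + t = i + t + 1 := by omega
      have hval : (rowStepL c i row t).getD p 0
          = if p = i + t + 1 then min (RminL c i t) (c.getD (i + t + 1) 0) else row.getD p 0 := by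
        rw [rowStepL, hprev]
        have hsel : (if c.getD (i + 1 + t) 0 < RminL c i t then row.set (i + 1 + t) (c.getD (i + 1 + t) 0)
            else row.set (i + 1 + t) (RminL c i t))
            = row.set (i + 1 + t) (min (RminL c i t) (c.getD (i + 1 + t) 0)) := by
          rw [← if_lt_eq_min]
          split <;> rfl
        rw [hsel, getD_set _ _ _ _ _ (by omega), e21]
      rw [hval]
      by_cases hp : p = i + t + 1
      · subst hp
        rw [if_pos rfl, if_pos (by omega : i ≤ i + t + 1 ∧ i + t + 1 ≤ i + (t + 1))]
        have he : i + t + 1 - i = t + 1 := by omega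
        rw [he]
        rfl
      · rw [if_neg hp, ih (by omega) p]
        by_cases h1 : i ≤ p ∧ p ≤ i + t
        · rw [if_pos h1, if_pos (by omega)]
        · rw [if_neg h1, if_neg (by omega)]

lemma stage2_len (c : List Int) (L : Nat) (M1 : List (List Int)) (hM1 : M1.length = L) (t : Nat) :
    ((List.range t).foldl (fun M i =>
      (List.range (L - (i + 1))).foldl (fun M k =>
        if c.getD (i + 1 + k) 0 < getMA M i (i + 1 + k - 1) then setMA M i (i + 1 + k) (c.getD (i + 1 + k) 0)
        else setMA M i (i + 1 + k) (getMA M i (i + 1 + k - 1))) M) M1).length = L := by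
  induction t with
  | zero => simpa using hM1
  | succ t ih =>
      rw [List.range_succ, List.foldl_append]
      simp only [List.foldl_cons, List.foldl_nil]
      rw [inner_len]
      exact ih

lemma stage2_get (c : List Int) (L : Nat) (M1 : List (List Int)) (hM1 : M1.length = L) :
    ∀ t, t ≤ L → ∀ r, r < L →
    ((List.range t).foldl (fun M i =>
      (List.range (L - (i + 1))).foldl (fun M k =>
        if c.getD (i + 1 + k) 0 < getMA M i (i + 1 + k - 1) then setMA M i (i + 1 + k) (c.getD (i + 1 + k) 0)
        else setMA M i (i + 1 + k) (getMA M i (i + 1 + k - 1))) M) M1).getD r []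
    = if r < t then (List.range (L - (r + 1))).foldl (rowStepL c r) (M1.getD r []) else M1.getD r [] := by
  intro t
  induction t with
  | zero => intro _ r _; rfl
  | succ t ih =>
      intro ht r hr
      rw [List.range_succ, List.foldl_append]
      simp only [List.foldl_cons, List.foldl_nil]
      have hlen : t < ((List.range t).foldl (fun M i =>
          (List.range (L - (i + 1))).foldl (fun M k =>
            if c.getD (i + 1 + k) 0 < getMA M i (i + 1 + k - 1) then setMA M i (i + 1 + k) (c.getD (i + 1 + k) 0)
            else setMA M i (i + 1 + k) (getMA M i (i + 1 + k - 1))) M) M1).length := by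
        rw [stage2_len c L M1 hM1]; omega
      rw [inner_get c t _ _ hlen r]
      by_cases hrt : r = t
      · subst hrt
        rw [if_pos rfl, ih (by omega) r hr, if_neg (by omega), if_pos (by omega)]
      · rw [if_neg hrt, ih (by omega) r hr]
        by_cases h2 : r < t
        · rw [if_pos h2, if_pos (by omega)]
        · rw [if_neg h2, if_neg (by omega)]

lemma processA_get (c : List Int) (i j : Nat) (hi : i < c.length) (hij : i ≤ j) (hj : j < c.length) :
    getMA (processA c) i j = RminL c i (j - i) := by
  have hstage1len : ∀ t, ((List.range t).foldl (fun M i => setMA M i i (c.getD i 0))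
      (List.replicate c.length (List.replicate c.length (50000000 : Int)))).length = c.length :=
    fun t => stage1_len c c.length t
  show ((processA c).getD i []).getD j 0 = RminL c i (j - i)
  rw [processA]
  simp only []
  rw [stage2_get c c.length _ (hstage1len c.length) c.length (le_refl _) i hi, if_pos hi]
  rw [stage1_get c c.length c.length (le_refl _) i hi, if_pos hi]
  rw [rowfold_get c c.length i hi (c.length - (i + 1)) (by omega) j, if_pos (by omega)]

lemma computeCycleA_eq (values : List Int) :
    computeCycleA values = PSl 0 values ++ PSl values.sum values := by
  rw [computeCycleA]
  simp only [foldPS]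
  simp

lemma cget_lo (P Q : List Int) (k : Nat) (hk : k < P.length) :
    (P ++ Q).getD k 0 = P.getD k 0 := by
  simp [List.getD_eq_getElem?_getD, List.getElem?_append_left hk]

lemma cget_hi (P : List Int) (total : Int) (k : Nat) (hk : k < P.length) :
    (P ++ P.map (· + total)).getD (P.length + k) 0 = P.getD k 0 + total := by
  rw [List.getD_eq_getElem?_getD, List.getElem?_append_right (by omega)]
  have h1 : P.length + k - P.length = k := by omega
  rw [h1, List.getElem?_map, List.getElem?_eq_getElem hk]
  simp [List.getD_eq_getElem?_getD, List.getElem?_eq_getElem hk]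

lemma A_loop (c : List Int) (N : Nat) (hN : 1 ≤ N) (hc : c.length = N + N) :
    ∀ t, t ≤ N →
    (List.range t).foldl (fun (st : List Int × Int) i =>
        ((if getMA (processA c) i (i + N - 1) + st.2 > 0 then (st.1 ++ [(i : Int)], st.2) else st).1,
          -(c.getD i 0))) ([], 0)
      = (WL c N t, if t = 0 then 0 else -(c.getD (t - 1) 0)) := by
  intro t
  induction t with
  | zero => intro _; rfl
  | succ t ih =>
      intro ht
      rw [List.range_succ, List.foldl_append, ih (by omega)]
      simp only [List.foldl_cons, List.foldl_nil]
      have hrmq : getMA (processA c) t (t + N - 1) = RminL c t (N - 1) := by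
        rw [processA_get c t (t + N - 1) (by omega) (by omega) (by omega)]
        have : t + N - 1 - t = N - 1 := by omega
        rw [this]
      rw [hrmq]
      have hW : WL c N (t + 1) = if condW c N t then WL c N t ++ [(t : Int)] else WL c N t := by
        rw [WL, List.range_succ, List.foldl_append]
        rfl
      rw [hW]
      have hcw : (condW c N t = true) ↔ (RminL c t (N - 1) + (if t = 0 then 0 else -(c.getD (t - 1) 0)) > 0) := by
        rw [condW]
        exact decide_eq_true_iff
      by_cases hcond : RminL c t (N - 1) + (if t = 0 then 0 else -(c.getD (t - 1) 0)) > 0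
      · rw [if_pos hcond, if_pos (hcw.mpr hcond)]
        simp
      · rw [if_neg hcond, if_neg (fun hh => hcond (hcw.mp hh))]
        simp

lemma runmin (xs : List Int) : ∀ t, t ≤ xs.length →
    (xs.take t).foldl (fun (st : List Int × Option Int) p =>
        let m := match st.2 with
          | none => p
          | some m0 => if p < m0 then p else m0
        (st.1 ++ [m], some m)) ([], none)
      = ((List.range t).map (fun k => RminL xs 0 k),
          if t = 0 then none else some (RminL xs 0 (t - 1))) := by
  intro t
  induction t with
  | zero => intro _; rfl
  | succ t ih =>
      intro ht
      have htake : xs.take (t + 1) = xs.take t ++ [xs.getD t 0] := by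
        rw [List.take_add_one, List.getElem?_eq_getElem (by omega)]
        simp [List.getD_eq_getElem?_getD, List.getElem?_eq_getElem (show t < xs.length by omega)]
      rw [htake, List.foldl_append, ih (by omega)]
      simp only [List.foldl_cons, List.foldl_nil]
      have hm : (match (if t = 0 then none else some (RminL xs 0 (t - 1))) with
          | none => xs.getD t 0
          | some m0 => if xs.getD t 0 < m0 then xs.getD t 0 else m0) = RminL xs 0 t := by
        by_cases h0 : t = 0
        · subst h0; rfl
        · rw [if_neg h0]
          show (if xs.getD t 0 < RminL xs 0 (t - 1) then xs.getD t 0 else RminL xs 0 (t - 1)) = _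
          rw [if_lt_eq_min]
          have e : 0 + (t - 1) + 1 = t := by omega
          calc min (RminL xs 0 (t - 1)) (xs.getD t 0)
              = min (RminL xs 0 (t - 1)) (xs.getD (0 + (t - 1) + 1) 0) := by rw [e]
            _ = RminL xs 0 ((t - 1) + 1) := rfl
            _ = RminL xs 0 t := by rw [(by omega : t - 1 + 1 = t)]
      rw [hm]
      refine Prod.ext ?_ ?_
      · show (List.range t).map (fun k => RminL xs 0 k) ++ [RminL xs 0 t] = _
        rw [List.range_succ, List.map_append]
        rfl
      · simp

lemma suf_getD (P : List Int) (N : Nat) (hP : P.length = N) (i : Nat) (hi : i < N) :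
    (((List.range N).map (fun k => RminL P.reverse 0 k)).reverse).getD i 0
      = RminL P i (N - 1 - i) := by
  have hlen : ((List.range N).map (fun k => RminL P.reverse 0 k)).length = N := by simp
  rw [getD_reverse _ i (by omega), hlen]
  have hk : N - 1 - i < N := by omega
  rw [List.getD_eq_getElem?_getD, List.getElem?_map, List.getElem?_range (by omega)]
  simp only [Option.map_some, Option.getD_some]
  rw [RminL_reverse P (N - 1 - i) (by omega), hP]
  have : N - 1 - (N - 1 - i) = i := by omega
  rw [this]

lemma B_loop (c P suf : List Int) (total : Int) (N : Nat) (hN : 1 ≤ N) (hP : P.length = N)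
    (hlo : ∀ k, k < N → c.getD k 0 = P.getD k 0)
    (hhi : ∀ k, k < N → c.getD (N + k) 0 = P.getD k 0 + total)
    (hsuf : ∀ i, i < N → suf.getD i 0 = RminL c i (N - 1 - i)) :
    ∀ t, t ≤ N →
    (List.range t).foldl (fun (st : List Int × Option Int × Int) i =>
        let m := suf.getD i 0
        let m := match st.2.1 with
          | some b => if b < m then b else m
          | none => m
        let winners := if m - st.2.2 > 0 then st.1 ++ [(i : Int)] else st.1
        let v2 := P.getD i 0 + total
        let best2 := match st.2.1 with
          | none => v2
          | some b => if v2 < b then v2 else b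
        (winners, some best2, P.getD i 0)) ([], none, 0)
      = (WL c N t,
          (if t = 0 then none else some (RminL c N (t - 1)),
           if t = 0 then 0 else P.getD (t - 1) 0)) := by
  intro t
  induction t with
  | zero => intro _; rfl
  | succ t ih =>
      intro ht
      rw [List.range_succ, List.foldl_append, ih (by omega)]
      simp only [List.foldl_cons, List.foldl_nil]
      -- the combined window minimum at index t
      have hm : (match (if t = 0 then none else some (RminL c N (t - 1))) with
          | some b => if b < suf.getD t 0 then b else suf.getD t 0
          | none => suf.getD t 0) = RminL c t (N - 1) := by
        by_cases h0 : t = 0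
        · subst h0
          show suf.getD 0 0 = RminL c 0 (N - 1)
          rw [hsuf 0 (by omega)]
          have : N - 1 - 0 = N - 1 := by omega
          rw [this]
        · rw [if_neg h0]
          show (if RminL c N (t - 1) < suf.getD t 0 then RminL c N (t - 1) else suf.getD t 0) = _
          rw [if_lt_eq_min, hsuf t (by omega)]
          have hsplit := RminL_split c t (N - 1 - t) (t - 1)
          have e1 : N - 1 - t + 1 + (t - 1) = N - 1 := by omega
          have e2 : t + (N - 1 - t) + 1 = N := by omega
          rw [e1, e2] at hsplit
          exact hsplit.symm
      have hb2 : (match (if t = 0 then none else some (RminL c N (t - 1))) with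
          | none => P.getD t 0 + total
          | some b => if P.getD t 0 + total < b then P.getD t 0 + total else b) = RminL c N t := by
        have hv2 : P.getD t 0 + total = c.getD (N + t) 0 := (hhi t (by omega)).symm
        by_cases h0 : t = 0
        · subst h0
          show P.getD 0 0 + total = RminL c N 0
          rw [hv2]
          rfl
        · rw [if_neg h0]
          show (if P.getD t 0 + total < RminL c N (t - 1) then P.getD t 0 + total else RminL c N (t - 1)) = _
          rw [if_lt_eq_min, hv2]
          have e : N + (t - 1) + 1 = N + t := by omega
          calc min (RminL c N (t - 1)) (c.getD (N + t) 0)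
              = min (RminL c N (t - 1)) (c.getD (N + (t - 1) + 1) 0) := by rw [e]
            _ = RminL c N ((t - 1) + 1) := rfl
            _ = RminL c N t := by rw [(by omega : t - 1 + 1 = t)]
      rw [hm, hb2]
      have hW : WL c N (t + 1) = if condW c N t then WL c N t ++ [(t : Int)] else WL c N t := by
        rw [WL, List.range_succ, List.foldl_append]
        rfl
      have hcw : (condW c N t = true) ↔
          (RminL c t (N - 1) + (if t = 0 then 0 else -(c.getD (t - 1) 0)) > 0) := by
        rw [condW]
        exact decide_eq_true_iff
      have hbase : (if t = 0 then (0 : Int) else P.getD (t - 1) 0)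
          = -(if t = 0 then 0 else -(c.getD (t - 1) 0)) := by
        by_cases h0 : t = 0
        · simp [h0]
        · rw [if_neg h0, if_neg h0, hlo (t - 1) (by omega)]
          ring
      rw [hW, hbase]
      by_cases hcond : RminL c t (N - 1) + (if t = 0 then 0 else -(c.getD (t - 1) 0)) > 0
      · rw [if_pos (by omega : RminL c t (N - 1) - -(if t = 0 then 0 else -(c.getD (t - 1) 0)) > 0),
            if_pos (hcw.mpr hcond)]
        simp
      · rw [if_neg (by omega : ¬ (RminL c t (N - 1) - -(if t = 0 then 0 else -(c.getD (t - 1) 0)) > 0)),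
            if_neg (fun hh => hcond (hcw.mp hh))]
        simp

lemma A_eq (values : List Int) (hN : 1 ≤ values.length) :
    caucusRace values
      = WL (PSl 0 values ++ (PSl 0 values).map (· + values.sum)) values.length values.length := by
  set c := PSl 0 values ++ (PSl 0 values).map (· + values.sum) with hcdef
  have hcy : computeCycleA values = c := by
    rw [computeCycleA_eq, hcdef]
    congr 1
    have := PSl_shift values 0 values.sum
    simpa using this
  have hclen : c.length = values.length + values.length := by
    rw [hcdef]
    simp [PSl_length]
  rw [caucusRace]
  simp only [hcy]
  rw [A_loop c values.length hN hclen values.length (le_refl _)]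

lemma B_eq (values : List Int) (hN : 1 ≤ values.length) :
    caucusRace_alt values
      = WL (PSl 0 values ++ (PSl 0 values).map (· + values.sum)) values.length values.length := by
  set N := values.length with hNdef
  set P := PSl 0 values with hPdef
  set c := P ++ P.map (· + values.sum) with hcdef
  have hPlen : P.length = N := by rw [hPdef, PSl_length]
  have hlo : ∀ k, k < N → c.getD k 0 = P.getD k 0 := by
    intro k hk
    rw [hcdef]
    exact cget_lo P _ k (by omega)
  have hhi : ∀ k, k < N → c.getD (N + k) 0 = P.getD k 0 + values.sum := by
    intro k hk
    have h := cget_hi P values.sum k (by omega)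
    rw [hPlen] at h
    rw [hcdef]
    exact h
  have hsuf : ∀ i, i < N →
      (((List.range N).map (fun k => RminL P.reverse 0 k)).reverse).getD i 0
        = RminL c i (N - 1 - i) := by
    intro i hi
    rw [suf_getD P N hPlen i hi]
    exact RminL_congr P c i (N - 1 - i) (fun k h1 h2 => (hlo k (by omega)).symm)
  have hrun := runmin P.reverse P.reverse.length (le_refl _)
  rw [List.take_length] at hrun
  rw [List.length_reverse, hPlen] at hrun
  rw [caucusRace_alt]
  simp only [foldPS]
  simp only [List.nil_append, zero_add]
  rw [hrun]
  rw [B_loop c P (((List.range N).map (fun k => RminL P.reverse 0 k)).reverse) values.sum N hN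
      hPlen hlo hhi hsuf N (le_refl _)]

-- ===== VERDICT (by name: the statement is the Claim_ definition above) =====
theorem caucusRace_spec : Claim_equal_caucusRace := by
  intro values _
  show caucusRace values = caucusRace_alt values
  by_cases h : values.length = 0
  · have hnil : values = [] := List.length_eq_zero_iff.mp h
    subst hnil
    rfl
  · rw [A_eq values (by omega), B_eq values (by omega)]
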